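-- pv_equiv track=rewrite | github.com/parkyoungjiin/algorithm | 프로그래머스/Lv1/부족한 금액 계산하기.py | solution
-- ===== SOURCE A (Python) =====
-- def solution(price, money, count):
--     answer = 0
--     for i in range(1, count+1):
--         answer += i * price
--     answer = answer - money
--     # 부족할 때 양수
--     if answer >= 0:
--         return answer
--     else:
--         return 0
-- ===== SOURCE B (Python) =====
-- def solution(price, money, count):
--     total = price * count * (count + 1) // 2 if count > 0 else 0
--     return max(total - money, 0)
-- ===== Notes on version B (the rewrite author's own statement) =====
-- stated objective: faster
-- what changed: Replaces the O(count) accumulation loop with the closed-form arithmetic-series total price*count*(count+1)//2 (0 when count <= 0) clipped at 0 with max.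
import Mathlib
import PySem

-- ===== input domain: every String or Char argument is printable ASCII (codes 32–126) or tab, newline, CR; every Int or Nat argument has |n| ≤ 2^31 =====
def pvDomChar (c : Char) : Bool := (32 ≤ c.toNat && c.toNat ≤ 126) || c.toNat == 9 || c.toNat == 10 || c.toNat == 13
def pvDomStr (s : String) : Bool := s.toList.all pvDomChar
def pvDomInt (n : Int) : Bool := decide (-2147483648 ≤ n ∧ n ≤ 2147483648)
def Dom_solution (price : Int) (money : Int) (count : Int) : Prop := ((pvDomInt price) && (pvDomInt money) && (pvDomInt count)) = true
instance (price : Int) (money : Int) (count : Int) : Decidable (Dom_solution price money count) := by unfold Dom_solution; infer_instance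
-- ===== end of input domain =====

-- B replaces A's O(count) accumulation loop with the closed-form series total (O(1)).

-- ===== PORT A =====
def solution (price : Int) (money : Int) (count : Int) : Int :=
  let answer : Int := (PySem.List.pyRange 1 (count + 1) 1).foldl (fun a i => a + i * price) 0
  let answer := answer - money
  if answer ≥ 0 then answer else 0

-- ===== PORT B =====
def solution_alt (price : Int) (money : Int) (count : Int) : Int :=
  let total : Int := if count > 0 then PySem.Int.floordiv (price * count * (count + 1)) 2 else 0
  max (total - money) 0

-- ===== PRECONDITION & SPEC =====
def Spec_solution (price : Int) (money : Int) (count : Int) (out : Int) : Prop := out = solution_alt price money count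
instance (price : Int) (money : Int) (count : Int) (out : Int) : Decidable (Spec_solution price money count out) := by unfold Spec_solution; infer_instance

-- ===== CLAIM (what is proved, stated in full; the proofs are below) =====
def Claim_equal_solution : Prop := ∀ (price : Int) (money : Int) (count : Int), Dom_solution price money count → Spec_solution price money count (solution price money count)

-- ===== LEMMAS AND PROOFS =====

-- twice A's loop sum equals price * n * (n+1)
theorem pv_sum2 (price : Int) : ∀ n : Nat,
    2 * (PySem.List.pyRange 1 ((n : Int) + 1) 1).foldl (fun a i => a + i * price) 0
      = price * n * (n + 1) := by
  intro n
  induction n with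
  | zero => simp [PySem.List.pyRange_one_eq_nil]
  | succ k ih =>
      have h : PySem.List.pyRange 1 ((k : Int) + 1 + 1) 1
          = PySem.List.pyRange 1 ((k : Int) + 1) 1 ++ [(k : Int) + 1] :=
        PySem.List.pyRange_one_succ_right (by omega)
      push_cast
      rw [show ((k : Int) + 1 + 1) = ((k : Int) + 1) + 1 by ring, h, List.foldl_append]
      simp only [List.foldl]
      push_cast at ih
      linarith [ih]

theorem pv_loop_eq (price : Int) (count : Int) (hc : 0 < count) :
    (PySem.List.pyRange 1 (count + 1) 1).foldl (fun a i => a + i * price) 0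
      = PySem.Int.floordiv (price * count * (count + 1)) 2 := by
  obtain ⟨n, rfl⟩ : ∃ n : Nat, count = (n : Int) := ⟨count.toNat, (Int.toNat_of_nonneg hc.le).symm⟩
  have h2 := pv_sum2 price n
  rw [show price * (n : Int) * ((n : Int) + 1)
        = 2 * ((PySem.List.pyRange 1 ((n : Int) + 1) 1).foldl (fun a i => a + i * price) 0) from h2.symm]
  rw [PySem.Int.floordiv_eq_ediv_of_pos (by omega)]
  omega

-- ===== VERDICT (by name: the statement is the Claim_ definition above) =====
theorem solution_spec : Claim_equal_solution := by
  intro price money count _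
  unfold Spec_solution solution solution_alt
  by_cases hc : 0 < count
  · rw [pv_loop_eq price count hc]
    simp only [hc, if_pos]
    omega
  · rw [PySem.List.pyRange_one_eq_nil (by omega)]
    simp only [List.foldl_nil, if_neg hc]
    omega
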